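-- pv_equiv track=rewrite | github.com/alxwen711/contestSubmissionArchive | codeforces/live contests/2024-3/961/c.py | f
-- ===== SOURCE A (Python) =====
-- def g(a,b):
--     if a >= b:
--         ans = 0
--         while b < a:
--             ans += 1
--             b = b*b
--     else:
--         ans = 0
--         while a <= b:
--             a = a*a
--             if a <= b: ans -= 1
--             else: break
--     return ans
--
-- def f(n,ar):
--     br = [0]*n # exponentiation count
--     for i in range(n-1):
--         if ar[i] == 1: continue # auto pass
--         if ar[i+1] == 1: return -1 # previous is not 1, auto fail
--         inc = g(ar[i],ar[i+1])
--         br[i+1] = max(0,br[i]+inc)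
--     return sum(br)
-- ===== SOURCE B (Python) =====
-- def g(a, b):
--     if a >= b:
--         ans = 0
--         while b < a:
--             ans += 1
--             b = b*b
--     else:
--         ans = 0
--         while a <= b:
--             a = a*a
--             if a <= b: ans -= 1
--             else: break
--     return ans
--
-- def f(n, ar):
--     head = ar[:max(n, 0)]
--     pairs = list(zip(head, head[1:]))
--     if any(x != 1 and y == 1 for x, y in pairs):
--         return -1
--     incs = [None if x == 1 else g(x, y) for x, y in pairs]
--     total = 0
--     for k in range(len(incs)):
--         s = best = 0
--         for j in range(k, -1, -1):
--             c = incs[j]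
--             if c is None:
--                 break
--             s += c
--             if s > best:
--                 best = s
--         total += best
--     return total
-- ===== Notes on version B (the rewrite author's own statement) =====
-- stated objective: alternative
-- what changed: B drops A's clipped left-to-right DP recurrence entirely: after a separate validation pass it precomputes the per-pair g-increments (with None marking resets at 1) and obtains each position's count as the maximum suffix sum of those increments since the last reset, via a nested downward scan per position; this trades A's O(n) recurrence for an O(n^2) closed characterization.
import Mathlib
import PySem

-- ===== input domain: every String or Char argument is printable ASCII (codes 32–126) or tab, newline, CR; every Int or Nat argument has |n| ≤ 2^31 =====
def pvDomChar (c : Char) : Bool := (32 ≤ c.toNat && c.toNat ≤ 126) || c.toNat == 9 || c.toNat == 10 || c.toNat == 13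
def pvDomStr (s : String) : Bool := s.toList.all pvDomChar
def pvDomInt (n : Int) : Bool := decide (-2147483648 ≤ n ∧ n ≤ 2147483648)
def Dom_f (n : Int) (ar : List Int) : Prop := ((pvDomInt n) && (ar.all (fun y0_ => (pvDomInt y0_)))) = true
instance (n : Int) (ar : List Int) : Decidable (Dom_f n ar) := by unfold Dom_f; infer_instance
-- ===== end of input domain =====

-- B abandons A's clipped DP recurrence: it validates first, precomputes the per-pair g-increments,
-- and recomputes each position's count from scratch as the maximum suffix sum of the increments
-- since the last reset (a nested downward scan); an alternative algorithm, equal on Pre_.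

-- ===== PORT A =====
-- helper g, shared verbatim by both Python versions; each while loop is ported with
-- fuel 64: within Dom (|values| ≤ 2^31) every terminating run of either loop takes
-- at most ~35 iterations (b*b at least squares once past 4), and Pre_ excludes the
-- value patterns on which the Python loops never terminate.
def gLoop1 : Nat → Int → Int → Int → Int
  | 0, _, _, ans => ans
  | fuel+1, a, b, ans => if b < a then gLoop1 fuel a (b*b) (ans+1) else ans

def gLoop2 : Nat → Int → Int → Int → Int
  | 0, _, _, ans => ans
  | fuel+1, a, b, ans =>
      if a ≤ b then
        (if a*a ≤ b then gLoop2 fuel (a*a) b (ans-1) else ans)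
      else ans

def g (a b : Int) : Int := if a ≥ b then gLoop1 64 a b 0 else gLoop2 64 a b 0

-- the for-loop of A: i runs over range(n-1); `none` models the early `return -1`
def fA_go (ar : List Int) : Nat → Nat → List Int → Option (List Int)
  | 0, _, br => some br
  | fuel+1, i, br =>
      if PySem.List.pyGetD ar (i : Int) 0 = 1 then fA_go ar fuel (i+1) br
      else if PySem.List.pyGetD ar ((i : Int) + 1) 0 = 1 then none
      else
        fA_go ar fuel (i+1)
          (PySem.List.pySetD br ((i : Int) + 1)
            (max 0 (PySem.List.pyGetD br (i : Int) 0 +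
                    g (PySem.List.pyGetD ar (i : Int) 0) (PySem.List.pyGetD ar ((i : Int) + 1) 0))))

def f (n : Int) (ar : List Int) : Int :=
  match fA_go ar (n - 1).toNat 0 (List.replicate n.toNat 0) with
  | none => -1
  | some br => br.sum

-- ===== PORT B =====
def chkFail : List (Int × Int) → Bool
  | [] => false
  | (x, y) :: rest => (!(x == 1) && y == 1) || chkFail rest

def incOf (p : Int × Int) : Option Int := if p.1 = 1 then none else some (g p.1 p.2)

-- the inner downward scan `for j in range(k, -1, -1)` of Source B, run over the reversed prefix
def sufBest : List (Option Int) → Int → Int → Int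
  | [], _, best => best
  | none :: _, _, best => best
  | some c :: rest, s, best =>
      sufBest rest (s + c) (if best < s + c then s + c else best)

def f_alt (n : Int) (ar : List Int) : Int :=
  let head := PySem.List.slice ar (some 0) (some (max n 0))
  let pairs := head.zip (PySem.List.slice head (some 1) none)
  if chkFail pairs then -1
  else
    let incs := pairs.map incOf
    (List.range incs.length).foldl
      (fun total k => total + sufBest ((incs.take (k+1)).reverse) 0 0) 0

-- ===== PRECONDITION & SPEC =====
-- divergence pattern of helper g: within Dom, g(x,y) (called only with x ≠ 1, y ≠ 1) loops forever exactly here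
def divPat (x y : Int) : Bool := (2 ≤ x && (y == 0 || y == -1)) || ((x == 0 || x == -1) && 2 ≤ y)

-- Pre_ admits exactly the inputs on which Python A returns a value:
-- 1st conjunct: the loop stays in bounds (n ≤ len(ar) or no iteration), or some in-bounds
--   adjacent failing pair (x ≠ 1 followed by y = 1) makes A return -1 before it can overrun
--   (otherwise A raises IndexError);
-- 2nd conjunct: every reachable divergence pattern of g is preceded by a failing pair that
--   makes A return -1 first (otherwise A loops forever inside g and never returns).
def Pre_f (n : Int) (ar : List Int) : Prop :=
  (n ≤ ar.length ∨ n ≤ 1 ∨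
    ∃ i ∈ List.range (ar.length - 1), (ar.getD i 0 ≠ 1 ∧ ar.getD (i+1) 0 = 1)) ∧
  ∀ i ∈ List.range (min (n.toNat - 1) (ar.length - 1)),
    divPat (ar.getD i 0) (ar.getD (i+1) 0) = true →
      ∃ j ∈ List.range i, (ar.getD j 0 ≠ 1 ∧ ar.getD (j+1) 0 = 1)
instance (n : Int) (ar : List Int) : Decidable (Pre_f n ar) := by unfold Pre_f; infer_instance

def pvWitness_f : Int × List Int := (3, [2, 4, 16])

def Spec_f (n : Int) (ar : List Int) (out : Int) : Prop := out = f_alt n ar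
instance (n : Int) (ar : List Int) (out : Int) : Decidable (Spec_f n ar out) := by unfold Spec_f; infer_instance

-- ===== CLAIM (what is proved, stated in full; the proofs are below) =====
def Claim_equal_f : Prop := ∀ (n : Int) (ar : List Int), Dom_f n ar → Pre_f n ar → Spec_f n ar (f n ar)

-- ===== LEMMAS AND PROOFS =====

-- proof-side bridge: the scalar DP scan (A's recurrence on the pair list)
def fB_scan : List (Int × Int) → Int → Int → Int
  | [], _, total => total
  | (x, y) :: rest, cur, total =>
      let cur' := if x = 1 then 0 else max 0 (cur + g x y)
      fB_scan rest cur' (total + cur')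

-- proof-side bridge: B's per-position recomputation, front-to-back with the reversed prefix carried
def Tscan : List (Option Int) → List (Option Int) → Int
  | _, [] => 0
  | rev, o :: rest => sufBest (o :: rev) 0 0 + Tscan (o :: rev) rest

theorem fB_scan_shift (l : List (Int × Int)) (c t : Int) :
    fB_scan l c t = t + fB_scan l c 0 := by
  induction l generalizing c t with
  | nil => simp [fB_scan]
  | cons p rest ih =>
      obtain ⟨x, y⟩ := p
      simp only [fB_scan]
      rw [ih, ih (t := 0 + _)]
      ring

theorem sufBest_shift (l : List (Option Int)) (s b t : Int) :
    sufBest l (t + s) (t + b) = t + sufBest l s b := by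
  induction l generalizing s b with
  | nil => simp [sufBest]
  | cons o rest ih =>
      cases o with
      | none => simp [sufBest]
      | some c =>
          simp only [sufBest]
          have h : t + s + c = t + (s + c) := by ring
          rw [h]
          by_cases hb : b < s + c
          · rw [if_pos (by omega), if_pos hb, ih]
          · rw [if_neg (by omega), if_neg hb, ih]

theorem sufBest_max (l : List (Option Int)) (s b1 b2 : Int) :
    sufBest l s (max b1 b2) = max b1 (sufBest l s b2) := by
  induction l generalizing s b2 with
  | nil => simp [sufBest]
  | cons o rest ih =>
      cases o with
      | none => simp [sufBest]
      | some c =>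
          simp only [sufBest]
          by_cases h2 : b2 < s + c
          · by_cases h1 : max b1 b2 < s + c
            · rw [if_pos h1, if_pos h2]
              have : (s + c) = max b1 (s + c) := by omega
              rw [this, ih]
              omega
            · rw [if_neg h1, if_pos h2]
              have : max b1 b2 = max b1 (s + c) := by omega
              rw [this, ih]
          · rw [if_neg (by omega), if_neg h2, ih]

theorem sufBest_cons_some (c : Int) (l : List (Option Int)) :
    sufBest (some c :: l) 0 0 = max 0 (c + sufBest l 0 0) := by
  simp only [sufBest, zero_add]
  have h1 : (if (0:Int) < c then c else 0) = max 0 c := by omega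
  rw [h1, sufBest_max]
  congr 1
  have h2 : c = c + 0 := by ring
  calc sufBest l c c = sufBest l (c + 0) (c + 0) := by rw [← h2]
    _ = c + sufBest l 0 0 := sufBest_shift l 0 0 c

theorem scan_eq_T (l : List (Int × Int)) (rev : List (Option Int)) (t : Int) :
    fB_scan l (sufBest rev 0 0) t = t + Tscan rev (l.map incOf) := by
  induction l generalizing rev t with
  | nil => simp [fB_scan, Tscan]
  | cons p rest ih =>
      obtain ⟨x, y⟩ := p
      simp only [fB_scan, List.map_cons]
      by_cases hx : x = 1
      · have hcur : (if x = 1 then (0:Int) else max 0 (sufBest rev 0 0 + g x y))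
            = sufBest ((none : Option Int) :: rev) 0 0 := by simp [hx, sufBest]
        rw [hcur, ih]
        simp only [Tscan, incOf, if_pos hx]
        ring
      · have hcur : (if x = 1 then (0:Int) else max 0 (sufBest rev 0 0 + g x y))
            = sufBest (some (g x y) :: rev) 0 0 := by
          rw [if_neg hx, sufBest_cons_some]
          ring_nf
        rw [hcur, ih]
        simp only [Tscan, incOf, if_neg hx]
        ring

theorem T_eq_sum (l rev : List (Option Int)) :
    Tscan rev l
      = ((List.range l.length).map
          (fun k => sufBest ((l.take (k+1)).reverse ++ rev) 0 0)).sum := by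
  induction l generalizing rev with
  | nil => simp [Tscan]
  | cons o rest ih =>
      rw [show Tscan rev (o :: rest) = sufBest (o :: rev) 0 0 + Tscan (o :: rev) rest from rfl,
        ih (o :: rev)]
      simp only [List.length_cons, List.range_succ_eq_map, List.map_cons, List.sum_cons,
        List.map_map]
      congr 1
      simp [Function.comp_def]

theorem foldl_add_sum (A : Nat → Int) (m : Nat) (t0 : Int) :
    (List.range m).foldl (fun t k => t + A k) t0 = t0 + ((List.range m).map A).sum := by
  induction m generalizing t0 with
  | zero => simp
  | succ m ih =>
      rw [List.range_succ]
      simp only [List.foldl_append, List.foldl_cons, List.foldl_nil, List.map_append,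
        List.map_cons, List.map_nil, List.sum_append, List.sum_cons, List.sum_nil]
      rw [ih]
      ring

theorem scan_total (pairs : List (Int × Int)) :
    fB_scan pairs 0 0
      = (List.range (pairs.map incOf).length).foldl
          (fun total k => total + sufBest (((pairs.map incOf).take (k+1)).reverse) 0 0) 0 := by
  have h0 : (0 : Int) = sufBest [] 0 0 := rfl
  rw [foldl_add_sum, zero_add]
  calc fB_scan pairs 0 0 = fB_scan pairs (sufBest [] 0 0) 0 := by rw [← h0]
    _ = 0 + Tscan [] (pairs.map incOf) := scan_eq_T pairs [] 0
    _ = _ := by rw [zero_add, T_eq_sum]; simp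

theorem go_eq (ar : List Int) (L : Nat) (hL : L ≤ ar.length) :
    ∀ (r i : Nat) (br : List Int), i + r = L - 1 → br.length = L →
    (∀ k, i < k → k < L → br.getD k 0 = 0) →
    (match fA_go ar r i br with
     | none => chkFail (((ar.take L).zip (ar.take L).tail).drop i) = true
     | some br' =>
         chkFail (((ar.take L).zip (ar.take L).tail).drop i) = false ∧
         br'.sum = br.sum + fB_scan (((ar.take L).zip (ar.take L).tail).drop i) (br.getD i 0) 0) := by
  intro r
  induction r with
  | zero =>
      intro i br hi hlen hz
      have hdrop : (((ar.take L).zip (ar.take L).tail).drop i) = [] := by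
        apply List.drop_eq_nil_of_le
        simp [List.length_zip, List.length_take]
        omega
      simp [fA_go, hdrop, chkFail, fB_scan]
  | succ r ih =>
      intro i br hi hlen hz
      have hi1 : i + 1 < L := by omega
      have hiar : i + 1 < ar.length := by omega
      have hplen : (((ar.take L).zip (ar.take L).tail)).length = L - 1 := by
        simp [List.length_zip, List.length_take]
        omega
      have hilt : i < (((ar.take L).zip (ar.take L).tail)).length := by omega
      have hpi : (((ar.take L).zip (ar.take L).tail))[i]'hilt = (ar[i]'(by omega), ar[i+1]'hiar) := by
        rw [List.getElem_zip]
        simp [List.getElem_tail, List.getElem_take]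
      have hdrop : (((ar.take L).zip (ar.take L).tail)).drop i
          = (ar[i]'(by omega), ar[i+1]'hiar) :: (((ar.take L).zip (ar.take L).tail)).drop (i+1) := by
        rw [List.drop_eq_getElem_cons hilt, hpi]
      have hgx : PySem.List.pyGetD ar (i : Int) 0 = ar[i]'(by omega) := by
        rw [PySem.List.pyGetD_natCast, List.getD_eq_getElem?_getD,
          List.getElem?_eq_getElem (by omega : i < ar.length)]; rfl
      have hgy : PySem.List.pyGetD ar ((i : Int) + 1) 0 = ar[i+1]'hiar := by
        have hc : ((i : Int) + 1) = ((i + 1 : Nat) : Int) := by push_cast; ring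
        rw [hc, PySem.List.pyGetD_natCast, List.getD_eq_getElem?_getD,
          List.getElem?_eq_getElem hiar]; rfl
      have hgbr : PySem.List.pyGetD br (i : Int) 0 = br.getD i 0 := by
        simp [PySem.List.pyGetD_natCast]
      rw [hdrop]
      simp only [fA_go, hgx, hgy, hgbr]
      split_ifs with h1 h2
      · -- ar[i] = 1 : skip
        have hz2 : br.getD (i+1) 0 = 0 := hz (i+1) (by omega) hi1
        have := ih (i+1) br (by omega) hlen (fun k hk1 hk2 => hz k (by omega) hk2)
        cases hgo : fA_go ar r (i+1) br with
        | none =>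
            rw [hgo] at this
            simp [chkFail, h1, this]
        | some br2 =>
            rw [hgo] at this
            refine ⟨by simp [chkFail, h1, this.1], ?_⟩
            rw [this.2, hz2]
            simp [fB_scan, h1]
      · -- fail pair
        simp [chkFail, h1, h2]
      · -- general pair
        have hcast : ((i : Int) + 1) = ((i + 1 : Nat) : Int) := by push_cast; ring
        set v : Int := max 0 (br.getD i 0 + g (ar[i]'(by omega)) (ar[i+1]'hiar)) with hv
        have hset : PySem.List.pySetD br ((i : Int) + 1) v = br.set (i+1) v := by
          rw [hcast, PySem.List.pySetD_natCast]
        rw [hset]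
        have hlen2 : (br.set (i+1) v).length = L := by simp [hlen]
        have hz2 : ∀ k, i + 1 < k → k < L → (br.set (i+1) v).getD k 0 = 0 := by
          intro k hk1 hk2
          rw [List.getD_eq_getElem?_getD, List.getElem?_set_ne (by omega)]
          rw [← List.getD_eq_getElem?_getD]
          exact hz k (by omega) hk2
        have hbri1 : br.getD (i+1) 0 = 0 := hz (i+1) (by omega) hi1
        have hgetset : (br.set (i+1) v).getD (i+1) 0 = v := by
          rw [List.getD_eq_getElem?_getD, List.getElem?_set_self (by omega)]
          rfl
        have hsum : (br.set (i+1) v).sum = br.sum + v := by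
          have h' : i + 1 < br.length := by omega
          have hbr : br[i+1]'h' = 0 := by
            rw [← hbri1, List.getD_eq_getElem?_getD, List.getElem?_eq_getElem h']
            rfl
          rw [List.sum_set, ← List.sum_take_add_sum_drop br (i+1+1),
            List.sum_take_succ _ _ h', hbr, if_pos h']
          ring
        have := ih (i+1) (br.set (i+1) v) (by omega) hlen2 hz2
        cases hgo : fA_go ar r (i+1) (br.set (i+1) v) with
        | none =>
            rw [hgo] at this
            simp [chkFail, this]
        | some br2 =>
            rw [hgo] at this
            refine ⟨by simp [chkFail, h2, this.1], ?_⟩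
            rw [this.2, hgetset, hsum]
            simp only [fB_scan, if_neg h1]
            rw [fB_scan_shift _ v (0 + v)]
            ring

theorem chkFail_of_mem (l : List (Int × Int)) (x y : Int)
    (hm : (x, y) ∈ l) (hx : x ≠ 1) (hy : y = 1) : chkFail l = true := by
  induction l with
  | nil => cases hm
  | cons p rest ih =>
      cases hm with
      | head => simp [chkFail, hx, hy]
      | tail _ h => simp [chkFail, ih h]

theorem go_none (ar : List Int) : ∀ (r i : Nat) (br : List Int) (i0 : Nat),
    i ≤ i0 → i0 < i + r → ar.getD i0 0 ≠ 1 → ar.getD (i0+1) 0 = 1 →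
    (∀ j, i ≤ j → j < i0 → ¬ (ar.getD j 0 ≠ 1 ∧ ar.getD (j+1) 0 = 1)) →
    fA_go ar r i br = none := by
  intro r
  induction r with
  | zero => intro i br i0 h1 h2 _ _ _; exact absurd h2 (by omega)
  | succ r ih =>
      intro i br i0 h1 h2 hx hy hfirst
      have hgb : PySem.List.pyGetD ar (i : Int) 0 = ar.getD i 0 := by
        simp [PySem.List.pyGetD_natCast]
      have hgb2 : PySem.List.pyGetD ar ((i : Int) + 1) 0 = ar.getD (i+1) 0 := by
        have hc : ((i : Int) + 1) = ((i + 1 : Nat) : Int) := by push_cast; ring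
        rw [hc, PySem.List.pyGetD_natCast]
      simp only [fA_go, hgb, hgb2]
      by_cases hii : i = i0
      · subst hii
        rw [if_neg hx, if_pos hy]
      · have hlt : i < i0 := by omega
        split_ifs with ha hb'
        · exact ih (i+1) br i0 (by omega) (by omega) hx hy
            (fun j hj1 hj2 => hfirst j (by omega) hj2)
        · rfl
        · exact ih (i+1) _ i0 (by omega) (by omega) hx hy
            (fun j hj1 hj2 => hfirst j (by omega) hj2)

theorem f_spec : Claim_equal_f := by
  intro n ar _ hpre
  rcases hpre with ⟨hb, -⟩
  simp only [Spec_f, f, f_alt]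
  have hmaxt : (max n 0).toNat = n.toNat := by omega
  have hhead : PySem.List.slice ar (some 0) (some (max n 0)) = ar.take n.toNat := by
    rw [PySem.List.slice_zero_start, PySem.List.slice_to ar (le_max_right n 0), hmaxt]
  rw [hhead, PySem.List.slice_from_one]
  by_cases h1 : n ≤ 1
  · have hm : (n - 1).toNat = 0 := by omega
    have htail : (ar.take n.toNat).tail = [] := by
      have hlen0 : (ar.take n.toNat).tail.length = 0 := by
        simp only [List.length_tail, List.length_take]
        omega
      exact List.eq_nil_of_length_eq_zero hlen0
    rw [hm, htail, List.zip_nil_right]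
    simp [fA_go, chkFail]
  by_cases h2 : n ≤ ar.length
  · have hL : n.toNat ≤ ar.length := by omega
    have hgo := go_eq ar n.toNat hL (n - 1).toNat 0 (List.replicate n.toNat 0)
      (by omega) (by simp) (fun k _ _ => by simp [List.getD])
    cases hA : fA_go ar (n - 1).toNat 0 (List.replicate n.toNat 0) with
    | none =>
        rw [hA] at hgo
        rw [List.drop_zero] at hgo
        simp [hgo]
    | some br' =>
        rw [hA] at hgo
        rw [List.drop_zero] at hgo
        have hsum : br'.sum = fB_scan ((ar.take n.toNat).zip (ar.take n.toNat).tail) 0 0 := by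
          rw [hgo.2]
          simp [List.getD]
        rw [scan_total] at hsum
        simp [hgo.1, hsum]
  · -- n > len(ar) (and n ≥ 2): Pre_ guarantees an in-bounds failing pair; both return -1
    have hfail : ∃ i, i < ar.length - 1 ∧ (ar.getD i 0 ≠ 1 ∧ ar.getD (i+1) 0 = 1) := by
      rcases hb with hb | hb | hb
      · omega
      · omega
      · obtain ⟨i, hi, hf⟩ := hb
        exact ⟨i, by simpa using hi, hf⟩
    have i0spec := Nat.find_spec hfail
    set i0 := Nat.find hfail with hi0
    have hfirst : ∀ j, 0 ≤ j → j < i0 → ¬ (ar.getD j 0 ≠ 1 ∧ ar.getD (j+1) 0 = 1) := by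
      intro j _ hj hfj
      exact Nat.find_min hfail hj ⟨by omega, hfj⟩
    have hA : fA_go ar (n - 1).toNat 0 (List.replicate n.toNat 0) = none :=
      go_none ar (n - 1).toNat 0 _ i0 (Nat.zero_le _) (by omega) i0spec.2.1 i0spec.2.2 hfirst
    rw [hA]
    have htake : ar.take n.toNat = ar := List.take_of_length_le (by omega)
    rw [htake]
    have hi0l : i0 < (ar.zip ar.tail).length := by
      simp [List.length_zip]
      omega
    have hi0ar : i0 + 1 < ar.length := by omega
    have hpi : (ar.zip ar.tail)[i0]'hi0l = (ar[i0]'(by omega), ar[i0+1]'hi0ar) := by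
      rw [List.getElem_zip]
      simp [List.getElem_tail]
    have hx : ar[i0]'(by omega) ≠ 1 := by
      have := i0spec.2.1
      rwa [List.getD_eq_getElem?_getD, List.getElem?_eq_getElem (by omega : i0 < ar.length)] at this
    have hy : ar[i0+1]'hi0ar = 1 := by
      have := i0spec.2.2
      rwa [List.getD_eq_getElem?_getD, List.getElem?_eq_getElem hi0ar] at this
    have hchk : chkFail (ar.zip ar.tail) = true :=
      chkFail_of_mem _ _ _ (hpi ▸ List.getElem_mem hi0l) hx hy
    simp [hchk]
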